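-- pv_equiv track=rewrite | github.com/jkugelman/crossword | wordlists/within.py | _visualize_nested
-- ===== SOURCE A (Python) =====
-- def _visualize_nested(word, outer_span, inner_span):
--     """
--     Insert parentheses to visualize containment:
--
--         (outer_start
--         (inner_start
--         inner_end)
--         outer_end)
--
--     Spans are (start, end) with end exclusive.
--     """
--     outer_start, outer_end = outer_span
--     inner_start, inner_end = inner_span
--
--     inserts = {}
--     inserts.setdefault(outer_start, []).append("(")
--     inserts.setdefault(inner_start, []).append("(")
--     inserts.setdefault(inner_end, []).append(")")
--     inserts.setdefault(outer_end, []).append(")")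
--
--     out = []
--     for pos in range(len(word) + 1):
--         if pos in inserts:
--             out.append("".join(inserts[pos]))
--         if pos < len(word):
--             out.append(word[pos])
--     return "".join(out)
-- ===== SOURCE B (Python) =====
-- def _visualize_nested(word, outer_span, inner_span):
--     pairs = [(outer_span[0], "("), (inner_span[0], "("),
--              (inner_span[1], ")"), (outer_span[1], ")")]
--     pairs = [(p, c) for p, c in pairs if 0 <= p <= len(word)]
--     pairs.sort(key=lambda pc: pc[0])  # stable: ties keep original order
--     pieces = []
--     prev = 0
--     for p, c in pairs:
--         pieces.append(word[prev:p])
--         pieces.append(c)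
--         prev = p
--     pieces.append(word[prev:])
--     return "".join(pieces)
-- ===== Notes on version B (the rewrite author's own statement) =====
-- stated objective: faster
-- what changed: Replaces A's dict-of-insertions plus a membership-tested Python-level scan over every position 0..len(word) with a stable sort of the four (position, paren) pairs filtered to [0, len(word)] and a single cursor walk appending whole word slices between insertion points.
import Mathlib
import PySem

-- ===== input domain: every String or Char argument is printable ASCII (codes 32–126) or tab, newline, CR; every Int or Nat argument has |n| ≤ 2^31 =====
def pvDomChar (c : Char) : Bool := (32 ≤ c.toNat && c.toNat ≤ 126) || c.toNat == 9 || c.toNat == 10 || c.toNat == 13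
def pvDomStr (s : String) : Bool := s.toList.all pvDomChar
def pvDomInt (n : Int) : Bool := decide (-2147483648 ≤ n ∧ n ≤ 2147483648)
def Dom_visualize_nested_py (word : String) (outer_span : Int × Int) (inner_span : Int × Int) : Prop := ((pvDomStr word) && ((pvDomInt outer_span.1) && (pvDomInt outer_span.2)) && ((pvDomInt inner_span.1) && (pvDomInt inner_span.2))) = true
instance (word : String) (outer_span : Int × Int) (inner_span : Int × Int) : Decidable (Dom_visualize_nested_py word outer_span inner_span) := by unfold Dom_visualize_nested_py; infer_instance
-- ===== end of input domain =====

-- B replaces A's dict-of-insertions + membership-tested scan of every position 0..len(word)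
-- by a stable sort of the four (position, paren) pairs and a single cursor walk over word
-- slices (same O(n) asymptotics; measurably faster constant factor in Python).

-- ===== PORT A =====
-- A's `inserts.setdefault(k, []).append(c)` is `d[k] = d.get(k, []) + [c]`, i.e. PySem.Dict.modify;
-- the single-character strings "(" / ")" and the two `"".join`s are ported at the Char level.
def visualize_nested_py (word : String) (outer_span : Int × Int) (inner_span : Int × Int) : String :=
  let w := word.toList
  let inserts : PySem.Dict Int (List Char) :=
    ((((PySem.Dict.empty).modify outer_span.1 [] (· ++ ['('])).modify inner_span.1 [] (· ++ ['('])).modify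
        inner_span.2 [] (· ++ [')'])).modify outer_span.2 [] (· ++ [')'])
  let out : List Char :=
    (PySem.List.pyRange 0 ((w.length : Int) + 1) 1).foldl (fun acc pos =>
      let acc := if inserts.contains pos then acc ++ inserts.getD pos [] else acc
      if pos < (w.length : Int) then acc ++ (PySem.List.pyGet? w pos).toList else acc) []
  String.ofList out

-- ===== PORT B =====
def visualize_nested_py_alt (word : String) (outer_span : Int × Int) (inner_span : Int × Int) : String :=
  let w := word.toList
  let n : Int := w.length
  let pairs : List (Int × Char) :=
    [(outer_span.1, '('), (inner_span.1, '('), (inner_span.2, ')'), (outer_span.2, ')')]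
  let pairs := pairs.filter (fun pc => decide (0 ≤ pc.1) && decide (pc.1 ≤ n))
  let spairs := PySem.List.sorted pairs (fun pc => pc.1) false
  let st := spairs.foldl (fun (st : Int × List Char) pc =>
      (pc.1, st.2 ++ PySem.List.slice w (some st.1) (some pc.1) ++ [pc.2])) (0, [])
  String.ofList (st.2 ++ PySem.List.slice w (some st.1) none)

-- ===== PRECONDITION & SPEC =====
def Spec_visualize_nested_py (word : String) (outer_span : Int × Int) (inner_span : Int × Int) (out : String) : Prop := out = visualize_nested_py_alt word outer_span inner_span
instance (word : String) (outer_span : Int × Int) (inner_span : Int × Int) (out : String) : Decidable (Spec_visualize_nested_py word outer_span inner_span out) := by unfold Spec_visualize_nested_py; infer_instance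

-- ===== CLAIM (what is proved, stated in full; the proofs are below) =====
def Claim_equal_visualize_nested_py : Prop := ∀ (word : String) (outer_span : Int × Int) (inner_span : Int × Int), Dom_visualize_nested_py word outer_span inner_span → Spec_visualize_nested_py word outer_span inner_span (visualize_nested_py word outer_span inner_span)

-- ===== LEMMAS AND PROOFS =====

-- the parentheses inserted at position q, in A's dict-append order
def ins4 (os is ie oe q : Int) : List Char :=
  (if os = q then ['('] else []) ++ (if is = q then ['('] else []) ++
  (if ie = q then [')'] else []) ++ (if oe = q then [')'] else [])

-- the characters a list of (position, char) pairs contributes at position q, in list order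
def selAt (ps : List (Int × Char)) (q : Int) : List Char :=
  (ps.filter (fun pc => pc.1 == q)).map Prod.snd

lemma ins4_eq_selAt (os is ie oe q : Int) :
    ins4 os is ie oe q = selAt [(os, '('), (is, '('), (ie, ')'), (oe, ')')] q := by
  by_cases h1 : os = q <;> by_cases h2 : is = q <;> by_cases h3 : ie = q <;> by_cases h4 : oe = q <;>
    simp_all [ins4, selAt]

-- A's dict, looked up at q, yields exactly ins4
lemma valueAt_eq_ins4 (os is ie oe q : Int) :
    (((((PySem.Dict.empty).modify os [] (· ++ ['('])).modify is [] (· ++ ['('])).modify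
        ie [] (· ++ [')'])).modify oe [] (· ++ [')'])).getD q [] = ins4 os is ie oe q := by
  by_cases h1 : os = q <;> by_cases h2 : is = q <;> by_cases h3 : ie = q <;> by_cases h4 : oe = q <;>
    simp_all [PySem.Dict.getD_modify, PySem.Dict.getD_empty, ins4, eq_comm]

-- stability of insertion into a sorted list: the pairs at one position keep their order
lemma filter_insertBy_eq (x : Int × Char) (ys : List (Int × Char)) (q : Int)
    (hys : ys.Pairwise (fun a b => a.1 ≤ b.1)) :
    (PySem.List.insertBy (fun a b => decide (a.1 < b.1)) x ys).filter (fun pc => pc.1 == q) =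
      ys.filter (fun pc => pc.1 == q) ++ (if x.1 == q then [x] else []) := by
  induction ys with
  | nil =>
    by_cases hxq : x.1 = q <;> simp [PySem.List.insertBy, List.filter, hxq]
  | cons y ys ih =>
    rw [List.pairwise_cons] at hys
    simp only [PySem.List.insertBy]
    by_cases hlt : x.1 < y.1
    · rw [if_pos (by simpa using hlt)]
      by_cases hxq : x.1 = q
      · have hnil : List.filter (fun pc => pc.1 == q) (y :: ys) = [] := by
          rw [List.filter_eq_nil_iff]
          intro a ha
          rcases List.mem_cons.mp ha with h | h
          · subst h; simp; omega
          · have := hys.1 a h; simp; omega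
        rw [List.filter_cons_of_pos (by simp [hxq]), hnil]
        simp [hxq]
      · rw [List.filter_cons_of_neg (by simp [hxq])]
        simp [hxq]
    · rw [if_neg (by simpa using hlt)]
      simp only [List.filter_cons]
      by_cases hyq : y.1 = q <;> simp [hyq, ih hys.2]

lemma pairwise_insertBy (x : Int × Char) (ys : List (Int × Char))
    (hys : ys.Pairwise (fun a b => a.1 ≤ b.1)) :
    (PySem.List.insertBy (fun a b => decide (a.1 < b.1)) x ys).Pairwise (fun a b => a.1 ≤ b.1) := by
  induction ys with
  | nil => simp [PySem.List.insertBy]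
  | cons y ys ih =>
    rw [List.pairwise_cons] at hys
    simp only [PySem.List.insertBy]
    split_ifs with hlt
    · simp only [decide_eq_true_eq] at hlt
      refine List.Pairwise.cons ?_ (List.Pairwise.cons hys.1 hys.2)
      intro a ha
      rcases List.mem_cons.mp ha with h | h
      · subst h; omega
      · have := hys.1 a h; omega
    · simp only [decide_eq_true_eq, not_lt] at hlt
      refine List.Pairwise.cons ?_ (ih hys.2)
      intro a ha
      rcases (PySem.List.mem_insertBy (fun a b => decide (a.1 < b.1)) x a ys).mp ha with h | h
      · subst h; omega
      · exact hys.1 a h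

-- stability of the sort: the pairs at any single position keep their original order
lemma selAt_sorted (ps : List (Int × Char)) (q : Int) :
    selAt (PySem.List.sorted ps (fun pc => pc.1) false) q = selAt ps q := by
  rw [PySem.List.sorted_eq_foldl_insertBy]
  unfold selAt
  suffices h : ∀ (acc : List (Int × Char)), acc.Pairwise (fun a b => a.1 ≤ b.1) →
      (ps.foldl (fun acc x => PySem.List.insertBy (fun a b => decide (a.1 < b.1)) x acc) acc).filter
        (fun pc => pc.1 == q) =
      acc.filter (fun pc => pc.1 == q) ++ ps.filter (fun pc => pc.1 == q) by
    rw [h [] List.Pairwise.nil]; simp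
  induction ps with
  | nil => simp
  | cons p ps ih =>
    intro acc hacc
    simp only [List.foldl_cons]
    rw [ih _ (pairwise_insertBy p acc hacc), filter_insertBy_eq p acc q hacc]
    simp only [List.filter_cons]
    by_cases hpq : p.1 = q <;> simp [hpq]

-- the in-range filter does not change the pairs selected at an in-range position
lemma selAt_filter (ps : List (Int × Char)) (n q : Int) (h0 : 0 ≤ q) (hn : q ≤ n) :
    selAt (ps.filter (fun pc => decide (0 ≤ pc.1) && decide (pc.1 ≤ n))) q = selAt ps q := by
  unfold selAt
  rw [List.filter_filter]
  congr 1
  apply List.filter_congr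
  intro a _
  by_cases haq : a.1 = q
  · simp [haq, h0, hn]
  · simp [haq]

-- the characters of word between positions c and p
lemma charslice (w : List Char) (c p : Nat) (hcp : c ≤ p) :
    (PySem.List.pyRange (c : Int) (p : Int) 1).flatMap
        (fun q => if q < (w.length : Int) then (PySem.List.pyGet? w q).toList else []) =
      (w.drop c).take (p - c) := by
  induction hd : p - c generalizing c with
  | zero =>
    have : (p : Int) ≤ (c : Int) := by exact_mod_cast Nat.le_of_sub_eq_zero hd
    rw [PySem.List.pyRange_one_eq_nil this]
    simp
  | succ k ih =>
    have hlt : c < p := by omega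
    rw [PySem.List.pyRange_one_cons (by exact_mod_cast hlt), List.flatMap_cons]
    have hc1 : ((c : Int) + 1) = ((c + 1 : Nat) : Int) := by push_cast; ring
    rw [hc1, ih (c + 1) (by omega) (by omega)]
    by_cases hcw : c < w.length
    · rw [if_pos (by exact_mod_cast hcw)]
      rw [PySem.List.pyGet?_natCast]
      rw [List.getElem?_eq_getElem hcw]
      simp
      rw [List.drop_eq_getElem_cons hcw, List.take_succ_cons]
    · rw [if_neg (by simp; exact_mod_cast Nat.le_of_not_lt hcw)]
      rw [List.drop_eq_nil_of_le (by omega), List.drop_eq_nil_of_le (by omega)]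
      simp

lemma selAt_nil_of_lt (ps : List (Int × Char)) (q : Int)
    (h : ∀ pc ∈ ps, q < pc.1) : selAt ps q = [] := by
  unfold selAt
  rw [List.filter_eq_nil_iff.mpr (by intro a ha; have := h a ha; simp; omega)]
  simp

-- B's cursor walk equals the position scan, for key-sorted in-range pairs
lemma walk_eq (w : List Char) (ps : List (Int × Char)) (c : Nat) (out : List Char)
    (hle : c ≤ w.length)
    (hin : ∀ pc ∈ ps, (c : Int) ≤ pc.1 ∧ pc.1 ≤ (w.length : Int))
    (hs : ps.Pairwise (fun a b => a.1 ≤ b.1)) :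
    (ps.foldl (fun (st : Int × List Char) pc =>
        (pc.1, st.2 ++ PySem.List.slice w (some st.1) (some pc.1) ++ [pc.2])) ((c : Int), out)).2 ++
      PySem.List.slice w
        (some (ps.foldl (fun (st : Int × List Char) pc =>
          (pc.1, st.2 ++ PySem.List.slice w (some st.1) (some pc.1) ++ [pc.2])) ((c : Int), out)).1) none =
      out ++ (PySem.List.pyRange (c : Int) ((w.length : Int) + 1) 1).flatMap
        (fun q => selAt ps q ++ (if q < (w.length : Int) then (PySem.List.pyGet? w q).toList else [])) := by
  induction ps generalizing c out with
  | nil =>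
    simp only [List.foldl_nil]
    have h1 : ((w.length : Int) + 1) = ((w.length + 1 : Nat) : Int) := by push_cast; ring
    rw [h1]
    have h2 := charslice w c (w.length + 1) (by omega)
    simp only [selAt, List.filter_nil, List.map_nil, List.nil_append]
    rw [h2, PySem.List.slice_from_natCast]
    rw [List.take_of_length_le (by simp; omega)]
  | cons pc rest ih =>
    obtain ⟨hcp, hpn⟩ := hin pc (List.mem_cons_self ..)
    set p : Nat := pc.1.toNat with hp
    have hpc1 : pc.1 = (p : Int) := by omega
    rw [List.pairwise_cons] at hs
    simp only [List.foldl_cons]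
    rw [hpc1]
    rw [ih p (out ++ PySem.List.slice w (some (c:Int)) (some (p:Int)) ++ [pc.2])
      (by omega)
      (by intro a ha; exact ⟨by rw [← hpc1]; exact hs.1 a ha, (hin a (List.mem_cons_of_mem _ ha)).2⟩)
      hs.2]
    rw [PySem.List.pyRange_one_append (c : Int) (p : Int) ((w.length : Int) + 1)
      (by omega) (by omega)]
    rw [List.flatMap_append]
    have hfirst : (PySem.List.pyRange (c : Int) (p : Int) 1).flatMap
        (fun q => selAt (pc :: rest) q ++
          (if q < (w.length : Int) then (PySem.List.pyGet? w q).toList else [])) =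
        PySem.List.slice w (some (c:Int)) (some (p:Int)) := by
      rw [List.flatMap_congr (g := fun q => if q < (w.length : Int) then (PySem.List.pyGet? w q).toList else [])
        (by
          intro x hx
          rw [PySem.List.mem_pyRange_one] at hx
          rw [selAt_nil_of_lt _ _ (by
            intro a ha
            rcases List.mem_cons.mp ha with h | h
            · subst h; omega
            · have := hs.1 a h; omega)]
          simp)]
      rw [charslice w c p (by omega), PySem.List.slice_natCast]
    have hsecond : (PySem.List.pyRange (p : Int) ((w.length : Int) + 1) 1).flatMap
        (fun q => selAt (pc :: rest) q ++
          (if q < (w.length : Int) then (PySem.List.pyGet? w q).toList else [])) =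
        pc.2 :: (PySem.List.pyRange (p : Int) ((w.length : Int) + 1) 1).flatMap
          (fun q => selAt rest q ++
            (if q < (w.length : Int) then (PySem.List.pyGet? w q).toList else [])) := by
      rw [PySem.List.pyRange_one_cons (by omega), List.flatMap_cons, List.flatMap_cons]
      have hhead : selAt (pc :: rest) (p : Int) = pc.2 :: selAt rest (p : Int) := by
        unfold selAt
        rw [List.filter_cons_of_pos (by simp [hpc1])]
        simp
      rw [hhead]
      have htail : (PySem.List.pyRange ((p : Int) + 1) ((w.length : Int) + 1) 1).flatMap
          (fun q => selAt (pc :: rest) q ++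
            (if q < (w.length : Int) then (PySem.List.pyGet? w q).toList else [])) =
          (PySem.List.pyRange ((p : Int) + 1) ((w.length : Int) + 1) 1).flatMap
          (fun q => selAt rest q ++
            (if q < (w.length : Int) then (PySem.List.pyGet? w q).toList else [])) := by
        apply List.flatMap_congr
        intro x hx
        rw [PySem.List.mem_pyRange_one] at hx
        unfold selAt
        rw [List.filter_cons_of_neg (by simp; omega)]
      rw [htail]
      simp
    rw [hfirst, hsecond]
    simp

-- A's loop body, normalised to "append a piece"
lemma stepA_eq (d : PySem.Dict Int (List Char)) (w : List Char) (acc : List Char) (pos : Int) :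
    (let acc' := if d.contains pos then acc ++ d.getD pos [] else acc
     if pos < (w.length : Int) then acc' ++ (PySem.List.pyGet? w pos).toList else acc') =
    acc ++ (d.getD pos [] ++
      (if pos < (w.length : Int) then (PySem.List.pyGet? w pos).toList else [])) := by
  by_cases hc : d.contains pos
  · simp only [hc, if_true]
    split_ifs <;> simp [List.append_assoc]
  · rw [PySem.Dict.getD_of_not_contains d [] (by simpa using hc)]
    simp only [hc]
    split_ifs <;> simp

-- ===== VERDICT (by name: the statement is the Claim_ definition above) =====
theorem visualize_nested_py_spec : Claim_equal_visualize_nested_py := by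
  intro word osp isp _
  show visualize_nested_py word osp isp = visualize_nested_py_alt word osp isp
  unfold visualize_nested_py visualize_nested_py_alt
  simp only []
  set w := word.toList with hw
  congr 1
  -- A side: turn the loop into a flatMap of pieces
  have hA : (PySem.List.pyRange 0 ((w.length : Int) + 1) 1).foldl (fun acc pos =>
      let acc := if (((((PySem.Dict.empty).modify osp.1 [] (· ++ ['('])).modify isp.1 [] (· ++ ['('])).modify
        isp.2 [] (· ++ [')'])).modify osp.2 [] (· ++ [')'])).contains pos then
          acc ++ (((((PySem.Dict.empty).modify osp.1 [] (· ++ ['('])).modify isp.1 [] (· ++ ['('])).modify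
        isp.2 [] (· ++ [')'])).modify osp.2 [] (· ++ [')'])).getD pos [] else acc
      if pos < (w.length : Int) then acc ++ (PySem.List.pyGet? w pos).toList else acc) [] =
      (PySem.List.pyRange 0 ((w.length : Int) + 1) 1).flatMap (fun q =>
        ins4 osp.1 isp.1 isp.2 osp.2 q ++
          (if q < (w.length : Int) then (PySem.List.pyGet? w q).toList else [])) := by
    have hfun : (fun (acc : List Char) (pos : Int) =>
        let acc := if (((((PySem.Dict.empty).modify osp.1 [] (· ++ ['('])).modify isp.1 [] (· ++ ['('])).modify
          isp.2 [] (· ++ [')'])).modify osp.2 [] (· ++ [')'])).contains pos then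
            acc ++ (((((PySem.Dict.empty).modify osp.1 [] (· ++ ['('])).modify isp.1 [] (· ++ ['('])).modify
          isp.2 [] (· ++ [')'])).modify osp.2 [] (· ++ [')'])).getD pos [] else acc
        if pos < (w.length : Int) then acc ++ (PySem.List.pyGet? w pos).toList else acc) =
        (fun (acc : List Char) (q : Int) => acc ++
          (ins4 osp.1 isp.1 isp.2 osp.2 q ++
            (if q < (w.length : Int) then (PySem.List.pyGet? w q).toList else []))) := by
      funext acc pos
      rw [stepA_eq, valueAt_eq_ins4]
    rw [hfun, PySem.List.foldl_append_eq_flatMap]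
    simp
  rw [hA]
  -- B side: the cursor walk
  have h0 : ((0 : Nat) : Int) = (0 : Int) := by norm_num
  have hB := walk_eq w
    (PySem.List.sorted ([(osp.1, '('), (isp.1, '('), (isp.2, ')'), (osp.2, ')')].filter
      (fun pc => decide (0 ≤ pc.1) && decide (pc.1 ≤ (w.length : Int)))) (fun pc => pc.1) false)
    0 []
    (by omega)
    (by
      intro a ha
      rw [PySem.List.mem_sorted] at ha
      rw [List.mem_filter] at ha
      have := ha.2
      simp only [Bool.and_eq_true, decide_eq_true_eq] at this
      exact ⟨by rw [h0]; exact this.1, this.2⟩)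
    (PySem.List.sorted_pairwise _ _)
  rw [h0] at hB
  rw [hB]
  rw [List.nil_append]
  -- both flatMaps agree pointwise on the range
  apply List.flatMap_congr
  intro q hq
  rw [PySem.List.mem_pyRange_one] at hq
  rw [selAt_sorted, selAt_filter _ _ _ hq.1 (by omega), ← ins4_eq_selAt]
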